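-- pv_equiv track=rewrite | github.com/GuidoBekkers/textClassifier | implication.py | solveConclusions
-- ===== SOURCE A (Python) =====
-- def solveConclusions(conclusions: list):
--     """Takes a list of tuples that indicate conclusions that the system derived based on the implications and combines
--     elements that have the same FeatureValue/name
--     Parameters
--     ----------
--     conclusions : list
--         a list with tuples ('name', 'truth value', 'importance', 'list of rules that led to this conclusion')
--     Returns
--     -------
--     It returns an updated list where the tuples with the same name get combined
--     """
--     answer = []
--     for i in conclusions:
--         if len(answer) > 0:
--             index = listContainsConclusion(answer, i[0])
--             if index > -1:
--                 answer[index] = mergeConclusions(answer[index], i)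
--             else:
--                 answer.append(i)
--         else:
--             answer.append(i)
--     return answer
--
-- def listContainsConclusion(list_: list, name: str):
--     """Takes a list of tuples that indicate conclusions and a string, and looks if there is a conclusion where its first
--     element is equal to name and returns the index
--     Parameters
--     ----------
--     conclusions : list
--         a list with tuples ('name', 'truth value', 'importance', 'set of rules that led to this conclusion')
--     name : str
--         a string that indicates the name of one of the conclusions
--     Returns
--     -------
--     It returns the index of the element in list_ with the same 'name' as name, or -1 if it is not present
--     """
--     for i in range(0, len(list_)):
--         if list_[i][0] == name:
--             return i
--     return -1
--
-- def mergeConclusions(conclusion1, conclusion2):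
--     """Takes two conclusions and combines them into one where the truth value is decided based on the truth values
--     and importances of the two tuples and the two 'sets' get combined
--     Parameters
--     ----------
--     conclusion1 : tuple
--         a tuple with 4 elements: 'name', 'truth value', 'importance', 'set of rules that led to this conclusion'
--     conclusion2 : tuple
--         a tuple with 4 elements: 'name', 'truth value', 'importance', 'set of rules that led to this conclusion'
--     Returns
--     -------
--     It returns a single tuple with the combination of the elements of the conclusions
--     """
--     value1 = conclusion1[2] if conclusion1[1] is True else -1 * conclusion1[2]
--     value2 = conclusion2[2] if conclusion2[1] is True else -1 * conclusion2[2]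
--     if set(conclusion2[3]) <= set(conclusion1[3]):
--         return conclusion1
--     return (conclusion1[0], True if value1 + value2 > 0 else False, abs(value1+value2), conclusion1[3]+conclusion2[3])
-- ===== SOURCE B (Python) =====
-- # B: two-phase group-then-reduce: build an ordered dict of name -> conclusions, then left-fold each group.
-- def solveConclusions(conclusions: list):
--     groups = {}
--     for c in conclusions:
--         groups.setdefault(c[0], []).append(c)
--     answer = []
--     for group in groups.values():
--         acc = group[0]
--         for c in group[1:]:
--             acc = mergeConclusions(acc, c)
--         answer.append(acc)
--     return answer
--
-- def mergeConclusions(conclusion1, conclusion2):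
--     value1 = conclusion1[2] if conclusion1[1] is True else -1 * conclusion1[2]
--     value2 = conclusion2[2] if conclusion2[1] is True else -1 * conclusion2[2]
--     if set(conclusion2[3]) <= set(conclusion1[3]):
--         return conclusion1
--     return (conclusion1[0], True if value1 + value2 > 0 else False, abs(value1+value2), conclusion1[3]+conclusion2[3])
-- ===== Notes on version B (the rewrite author's own statement) =====
-- stated objective: alternative
-- what changed: Replaced A's interleaved scan-and-merge (linear search of the answer list for every conclusion, merging in place) by a two-phase pipeline: first group conclusions by name into an insertion-ordered map, then left-fold each group with mergeConclusions.
import Mathlib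
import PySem

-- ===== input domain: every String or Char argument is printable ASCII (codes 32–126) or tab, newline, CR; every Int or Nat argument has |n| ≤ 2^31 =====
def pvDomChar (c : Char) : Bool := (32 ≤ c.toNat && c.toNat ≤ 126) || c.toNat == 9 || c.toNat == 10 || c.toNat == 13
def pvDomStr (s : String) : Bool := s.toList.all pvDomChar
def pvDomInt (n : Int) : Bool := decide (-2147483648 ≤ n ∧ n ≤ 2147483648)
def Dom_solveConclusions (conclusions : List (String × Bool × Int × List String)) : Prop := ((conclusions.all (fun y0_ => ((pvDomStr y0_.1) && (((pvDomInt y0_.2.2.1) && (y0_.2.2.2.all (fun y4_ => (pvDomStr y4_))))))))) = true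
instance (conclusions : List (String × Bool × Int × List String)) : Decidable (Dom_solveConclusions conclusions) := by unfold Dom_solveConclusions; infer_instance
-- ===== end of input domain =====

-- B replaces A's interleaved scan-and-merge with a two-phase group-by-name (ordered assoc map) then
-- left-fold of each group; same return value, the restructuring is the point (objective: alternative).

-- ===== PORT A =====
-- shared helper of both Pythons (identical code in Source A and Source B): mergeConclusions.
-- `set(conclusion2[3]) <= set(conclusion1[3])` ported as "every element of the second list occurs
-- in the first", which is exactly Python's set inclusion here.
def mergeConclusions (c1 c2 : String × Bool × Int × List String) : String × Bool × Int × List String :=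
  let value1 : Int := if c1.2.1 = true then c1.2.2.1 else -1 * c1.2.2.1
  let value2 : Int := if c2.2.1 = true then c2.2.2.1 else -1 * c2.2.2.1
  if c2.2.2.2.all (fun r => c1.2.2.2.contains r) then c1
  else (c1.1, if value1 + value2 > 0 then true else false, |value1 + value2|, c1.2.2.2 ++ c2.2.2.2)

-- for i in range(0, len(list_)): if list_[i][0] == name: return i / return -1
def listContainsConclusionAux (list_ : List (String × Bool × Int × List String)) (name : String) (i : Nat) : Int :=
  match list_ with
  | [] => -1
  | x :: rest => if x.1 = name then (i : Int) else listContainsConclusionAux rest name (i + 1)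

def listContainsConclusion (list_ : List (String × Bool × Int × List String)) (name : String) : Int :=
  listContainsConclusionAux list_ name 0

-- the body of A's for-loop over `conclusions` (state: answer); answer[index] read/write via PySem
-- (index > -1 implies in range here, so the total forms are exact)
def solveStep (answer : List (String × Bool × Int × List String)) (i : String × Bool × Int × List String) : List (String × Bool × Int × List String) :=
  if answer.length > 0 then
    let index := listContainsConclusion answer i.1
    if index > -1 then
      PySem.List.pySetD answer index (mergeConclusions (PySem.List.pyGetD answer index i) i)
    else answer ++ [i]
  else answer ++ [i]

def solveConclusions (conclusions : List (String × Bool × Int × List String)) : List (String × Bool × Int × List String) :=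
  conclusions.foldl solveStep []

-- ===== PORT B =====
-- groups.setdefault(c[0], []).append(c) on the ordered dict, as an insertion-order assoc list
def addToGroup (groups : List (String × List (String × Bool × Int × List String))) (c : String × Bool × Int × List String) : List (String × List (String × Bool × Int × List String)) :=
  match groups with
  | [] => [(c.1, [c])]
  | (k, g) :: rest => if k = c.1 then (k, g ++ [c]) :: rest else (k, g) :: addToGroup rest c

-- acc = group[0]; for c in group[1:]: acc = mergeConclusions(acc, c)  (groups are never empty)
def reduceGroup (g : List (String × Bool × Int × List String)) : String × Bool × Int × List String :=
  match g with
  | [] => ("", false, 0, [])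
  | g0 :: rest => rest.foldl mergeConclusions g0

def solveConclusions_alt (conclusions : List (String × Bool × Int × List String)) : List (String × Bool × Int × List String) :=
  let groups := conclusions.foldl addToGroup []
  groups.map (fun kg => reduceGroup kg.2)

-- ===== PRECONDITION & SPEC =====
def Spec_solveConclusions (conclusions : List (String × Bool × Int × List String)) (out : List (String × Bool × Int × List String)) : Prop := out = solveConclusions_alt conclusions
instance (conclusions : List (String × Bool × Int × List String)) (out : List (String × Bool × Int × List String)) : Decidable (Spec_solveConclusions conclusions out) := by unfold Spec_solveConclusions; infer_instance

-- ===== CLAIM (what is proved, stated in full; the proofs are below) =====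
def Claim_equal_solveConclusions : Prop := ∀ (conclusions : List (String × Bool × Int × List String)), Dom_solveConclusions conclusions → Spec_solveConclusions conclusions (solveConclusions conclusions)

-- ===== LEMMAS AND PROOFS =====

-- mergeConclusions keeps the first conclusion's name
theorem merge_fst (a b : String × Bool × Int × List String) : (mergeConclusions a b).1 = a.1 := by
  unfold mergeConclusions; split_ifs <;> rfl

theorem foldl_merge_fst (l : List (String × Bool × Int × List String)) (a : String × Bool × Int × List String) :
    (l.foldl mergeConclusions a).1 = a.1 := by
  induction l generalizing a with
  | nil => rfl
  | cons x xs ih => simp [List.foldl_cons, ih, merge_fst]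

-- invariant for B's group map: every group is nonempty and headed by a conclusion carrying its key
def GInv (groups : List (String × List (String × Bool × Int × List String))) : Prop :=
  ∀ kg ∈ groups, ∃ g0 r, kg.2 = g0 :: r ∧ g0.1 = kg.1

theorem GInv_nil : GInv [] := by intro kg h; cases h

theorem GInv_add (groups : List (String × List (String × Bool × Int × List String))) (c : String × Bool × Int × List String) (h : GInv groups) : GInv (addToGroup groups c) := by
  induction groups with
  | nil =>
    intro kg hkg
    simp only [addToGroup, List.mem_singleton] at hkg
    subst hkg; exact ⟨c, [], rfl, rfl⟩
  | cons p rest ih =>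
    obtain ⟨k, g⟩ := p
    intro kg hkg
    by_cases hke : k = c.1
    · simp only [addToGroup, if_pos hke, List.mem_cons] at hkg
      rcases hkg with rfl | hkg
      · obtain ⟨g0, r, hg, hfst⟩ := h (k, g) (by simp)
        exact ⟨g0, r ++ [c], by simp only at hg ⊢; rw [hg]; simp, hfst⟩
      · exact h kg (List.mem_cons_of_mem _ hkg)
    · simp only [addToGroup, if_neg hke, List.mem_cons] at hkg
      rcases hkg with rfl | hkg
      · exact h (k, g) (by simp)
      · exact ih (fun q hq => h q (List.mem_cons_of_mem _ hq)) kg hkg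

theorem reduceGroup_fst (kg : String × List (String × Bool × Int × List String)) (g0 r) (hg : kg.2 = g0 :: r) (hfst : g0.1 = kg.1) :
    (reduceGroup kg.2).1 = kg.1 := by
  rw [hg]; simp [reduceGroup, foldl_merge_fst, hfst]

def render (groups : List (String × List (String × Bool × Int × List String))) : List (String × Bool × Int × List String) :=
  groups.map (fun kg => reduceGroup kg.2)

-- listContainsConclusion is first-index search
theorem lccAux_eq (l : List (String × Bool × Int × List String)) (name : String) :
    ∀ i : Nat, listContainsConclusionAux l name i =
      match l.findIdx? (fun x => x.1 = name) with
      | none => -1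
      | some j => ((i + j : Nat) : Int) := by
  induction l with
  | nil => intro i; rfl
  | cons x rest ih =>
    intro i
    rw [listContainsConclusionAux, List.findIdx?_cons]
    by_cases hx : x.1 = name
    · simp [hx]
    · simp only [hx, decide_eq_true_eq, ih (i + 1)]
      cases h : rest.findIdx? (fun x => x.1 = name) with
      | none => simp
      | some j => simp; ring

-- PySem total write at a Nat index is List.set
theorem pySetD_natCast {α : Type} (xs : List α) (n : Nat) (v : α) :
    PySem.List.pySetD xs (n : Int) v = xs.set n v := by
  simp only [PySem.List.pySetD, PySem.List.pySet?, PySem.List.pyIdx?]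
  split_ifs with h1 h2 <;> simp_all
  all_goals first
    | omega
    | (exact Eq.symm (List.set_eq_of_length_le (by omega)))

-- the key step lemma: A's loop body on the rendered groups = render of B's grouping step
theorem step_render (groups : List (String × List (String × Bool × Int × List String))) (hInv : GInv groups) (c : String × Bool × Int × List String) :
    solveStep (render groups) c = render (addToGroup groups c) := by
  induction groups with
  | nil => rfl
  | cons p rest ih =>
    obtain ⟨k, g⟩ := p
    obtain ⟨g0, r, hg, hfst⟩ := hInv (k, g) (by simp)
    replace hg : g = g0 :: r := hg
    replace hfst : g0.1 = k := hfst
    have hInvRest : GInv rest := fun q hq => hInv q (List.mem_cons_of_mem _ hq)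
    have hhead : (reduceGroup g).1 = k := reduceGroup_fst (k, g) g0 r hg hfst
    have hih := ih hInvRest
    simp only [solveStep, render, List.map_cons] at hih ⊢
    by_cases hk : k = c.1
    · -- head group matches: index 0, merge in place = fold the extended group
      have hlcc : listContainsConclusion (reduceGroup g :: List.map (fun kg => reduceGroup kg.2) rest) c.1 = 0 := by
        simp [listContainsConclusion, listContainsConclusionAux, hhead, hk]
      have hmerge : mergeConclusions (reduceGroup g) c = reduceGroup (g ++ [c]) := by
        subst hg; simp [reduceGroup, List.foldl_append]
      simp only [addToGroup, if_pos hk, List.map_cons, List.length_cons, hlcc]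
      rw [if_pos (by omega), if_pos (by omega : (0:Int) > -1)]
      rw [show ((0:Int)) = ((0:Nat):Int) from rfl, pySetD_natCast]
      simp [PySem.List.pyGetD_zero_cons, hmerge]
    · -- head group does not match: the search and the update shift over the head
      have hne : ((reduceGroup g).1 = c.1) = False := by simp [hhead, hk]
      simp only [addToGroup, if_neg hk, List.map_cons, List.length_cons]
      cases hfind : (List.map (fun kg => reduceGroup kg.2) rest).findIdx? (fun x => x.1 = c.1) with
      | none =>
        -- not found anywhere: both sides append
        have hA : List.map (fun kg => reduceGroup kg.2) rest ++ [c]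
            = List.map (fun kg => reduceGroup kg.2) (addToGroup rest c) := by
          simp only [listContainsConclusion, lccAux_eq, hfind] at hih
          norm_num at hih
          exact hih
        have hlcc : listContainsConclusion (reduceGroup g :: List.map (fun kg => reduceGroup kg.2) rest) c.1 = -1 := by
          simp [listContainsConclusion, listContainsConclusionAux, hne, lccAux_eq, hfind]
        rw [hlcc, if_pos (by omega), if_neg (by omega : ¬((-1:Int) > -1))]
        rw [List.cons_append, hA]
      | some j =>
        -- found at position j of the tail: index j+1; the write shifts over the head
        have hjlt : j < (List.map (fun kg => reduceGroup kg.2) rest).length :=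
          (List.findIdx?_eq_some_iff_findIdx_eq.mp hfind).1
        have hlcc : listContainsConclusion (reduceGroup g :: List.map (fun kg => reduceGroup kg.2) rest) c.1
            = (((j + 1 : Nat)) : Int) := by
          simp [listContainsConclusion, listContainsConclusionAux, hne, lccAux_eq, hfind]
          ring
        have hrest : listContainsConclusion (List.map (fun kg => reduceGroup kg.2) rest) c.1 = ((j : Nat) : Int) := by
          simp [listContainsConclusion, lccAux_eq, hfind]
        rw [hrest, if_pos (by omega), if_pos (by omega : ((j:Nat):Int) > -1)] at hih
        rw [pySetD_natCast] at hih
        simp only [PySem.List.pyGetD_natCast] at hih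
        rw [hlcc, if_pos (by omega), if_pos (by omega : (((j + 1 : Nat)):Int) > -1)]
        rw [pySetD_natCast]
        simp only [PySem.List.pyGetD_natCast, List.getD_cons_succ, List.set_cons_succ]
        rw [hih]

-- the loop correspondence
theorem fold_render (cs : List (String × Bool × Int × List String)) :
    ∀ groups : List (String × List (String × Bool × Int × List String)), GInv groups → cs.foldl solveStep (render groups) = render (cs.foldl addToGroup groups) := by
  induction cs with
  | nil => intro groups _; rfl
  | cons c rest ih =>
    intro groups hInv
    simp only [List.foldl_cons]
    rw [step_render groups hInv c]
    exact ih _ (GInv_add groups c hInv)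

-- ===== VERDICT (by name: the statement is the Claim_ definition above) =====
theorem solveConclusions_spec : Claim_equal_solveConclusions := by
  intro conclusions _
  show solveConclusions conclusions = solveConclusions_alt conclusions
  have := fold_render conclusions [] GInv_nil
  simpa [solveConclusions, solveConclusions_alt, render] using this
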